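-- pv_equiv track=rewrite | github.com/jokimf/aoc | aoc24/5/day5-2.py | identify_wrong_index
-- ===== SOURCE A (Python) =====
-- def identify_wrong_index(line: list[int], rules) -> bool:
--     not_allowed_anymore = set()
--     for index, number in enumerate(line):
--         if number not in not_allowed_anymore:
--             not_allowed_anymore |= rules.get(number, set())
--         else:
--             return index
--     return None
-- ===== SOURCE B (Python) =====
-- def identify_wrong_index(line: list[int], rules) -> bool:
--     for j, number in enumerate(line):
--         if any(number in rules.get(prev, set()) for prev in line[:j]):
--             return j
--     return None
-- ===== Notes on version B (the rewrite author's own statement) =====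
-- stated objective: alternative
-- what changed: Replaces the accumulating forbidden-set state with a stateless nested scan: for each index j it rechecks every earlier element's rule set for line[j], returning the first hit.
import Mathlib
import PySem

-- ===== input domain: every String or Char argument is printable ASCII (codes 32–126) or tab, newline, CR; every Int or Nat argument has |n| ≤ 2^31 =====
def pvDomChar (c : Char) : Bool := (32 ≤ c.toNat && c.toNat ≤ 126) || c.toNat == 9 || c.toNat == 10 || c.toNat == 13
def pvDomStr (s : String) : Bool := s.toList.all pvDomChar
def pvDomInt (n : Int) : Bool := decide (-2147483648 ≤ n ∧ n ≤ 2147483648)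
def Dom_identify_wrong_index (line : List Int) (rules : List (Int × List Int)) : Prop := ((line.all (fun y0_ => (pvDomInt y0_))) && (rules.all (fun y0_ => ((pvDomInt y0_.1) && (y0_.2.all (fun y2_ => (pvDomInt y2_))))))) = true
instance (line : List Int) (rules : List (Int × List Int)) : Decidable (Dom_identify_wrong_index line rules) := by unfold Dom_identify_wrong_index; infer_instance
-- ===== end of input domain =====

-- B replaces A's accumulating forbidden-set state with a stateless nested scan of earlier elements (alternative decomposition, not faster).


-- ===== PORT A =====
-- the for-loop over enumerate(line) with the maintained set `not_allowed_anymore`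
def pvGoA (rules : List (Int × List Int)) : List Int → Int → PySem.Set Int → Option Int
  | [], _, _ => none
  | number :: rest, index, notAllowed =>
    if !(PySem.Set.contains notAllowed number) then
      pvGoA rules rest (index + 1) (PySem.Set.union notAllowed (PySem.Dict.getD ⟨rules⟩ number PySem.Set.empty))
    else
      some index

def identify_wrong_index (line : List Int) (rules : List (Int × List Int)) : Option Int :=
  pvGoA rules line 0 PySem.Set.empty

-- ===== PORT B =====
-- any(number in rules.get(prev, set()) for prev in line[:j])
def pvHitB (rules : List (Int × List Int)) (pre : List Int) (number : Int) : Bool :=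
  pre.any (fun prev => PySem.Set.contains (PySem.Dict.getD ⟨rules⟩ prev PySem.Set.empty) number)

-- the outer loop: `pre` is line[:j], `j` the current index
def pvGoB (rules : List (Int × List Int)) : List Int → List Int → Int → Option Int
  | _, [], _ => none
  | pre, number :: rest, j =>
    if pvHitB rules pre number then some j
    else pvGoB rules (pre ++ [number]) rest (j + 1)

def identify_wrong_index_alt (line : List Int) (rules : List (Int × List Int)) : Option Int :=
  pvGoB rules [] line 0

-- ===== PRECONDITION & SPEC =====
def Spec_identify_wrong_index (line : List Int) (rules : List (Int × List Int)) (out : Option Int) : Prop := out = identify_wrong_index_alt line rules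
instance (line : List Int) (rules : List (Int × List Int)) (out : Option Int) : Decidable (Spec_identify_wrong_index line rules out) := by unfold Spec_identify_wrong_index; infer_instance

-- ===== CLAIM (what is proved, stated in full; the proofs are below) =====
def Claim_equal_identify_wrong_index : Prop := ∀ (line : List Int) (rules : List (Int × List Int)), Dom_identify_wrong_index line rules → Spec_identify_wrong_index line rules (identify_wrong_index line rules)

-- ===== LEMMAS AND PROOFS =====

-- invariant: A's maintained set has the same members as "some earlier element forbids x"
theorem pvGo_eq (rules : List (Int × List Int)) (rest : List Int) :
    ∀ (pre : List Int) (idx : Int) (forb : PySem.Set Int),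
    (∀ x : Int, PySem.Set.contains forb x = pvHitB rules pre x) →
    pvGoA rules rest idx forb = pvGoB rules pre rest idx := by
  induction rest with
  | nil => intro pre idx forb _; rfl
  | cons n rest ih =>
    intro pre idx forb h
    simp only [pvGoA, pvGoB, h n]
    by_cases hn : pvHitB rules pre n = true
    · simp [hn]
    · simp only [Bool.not_eq_true] at hn
      simp only [hn, Bool.not_false, Bool.false_eq_true, if_neg (fun c => c)]
      apply ih
      intro x
      apply Bool.eq_iff_iff.mpr
      rw [PySem.Set.contains_iff _ _, PySem.Set.mem_union _ _ _]
      have hc : forb.contains x = pvHitB rules pre x := h x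
      have h1 : x ∈ forb ↔ pvHitB rules pre x = true := by
        rw [← PySem.Set.contains_iff _ _, hc]
      have h2 : x ∈ PySem.Dict.getD ⟨rules⟩ n PySem.Set.empty ↔
          PySem.Set.contains (PySem.Dict.getD ⟨rules⟩ n PySem.Set.empty) x = true :=
        (PySem.Set.contains_iff _ _).symm
      simp only [pvHitB, List.any_append, List.any_cons, List.any_nil, Bool.or_false,
        Bool.or_eq_true] at *
      tauto

-- ===== VERDICT (by name: the statement is the Claim_ definition above) =====
theorem identify_wrong_index_spec : Claim_equal_identify_wrong_index := by
  intro line rules _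
  unfold Spec_identify_wrong_index identify_wrong_index identify_wrong_index_alt
  apply pvGo_eq
  intro x
  simp [PySem.Set.empty, pvHitB]
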